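-- pv_equiv track=rewrite | github.com/tolgagim/lbys | Server/generate_entities_v3.py | get_primary_key_name
-- ===== SOURCE A (Python) =====
-- def clean_name(name):
--     """VEM_ prefix'ini kaldir"""
--     if name and name.startswith('VEM_'):
--         return name[4:]
--     return name
--
-- def get_primary_key_name(table_name, columns):
--     """Tablonun primary key kolonunu belirle"""
--     clean_table = clean_name(table_name)
--
--     # Oncelik 1: TABLO_KODU (ornegin AMELIYAT tablosu icin AMELIYAT_KODU)
--     expected_pk = f"{clean_table}_KODU"
--     for col in columns:
--         if col.get('name') == expected_pk:
--             return expected_pk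
--
--     # Oncelik 2: Ilk kolon _KODU ile bitiyorsa
--     if columns and len(columns) > 0:
--         first_col = columns[0].get('name', '')
--         if first_col.endswith('_KODU'):
--             return first_col
--
--     # Oncelik 3: _KODU ile biten ilk kolon
--     for col in columns:
--         col_name = col.get('name', '')
--         if col_name.endswith('_KODU'):
--             return col_name
--
--     # Oncelik 4: ID ile biten kolon
--     for col in columns:
--         col_name = col.get('name', '')
--         if col_name.endswith('_ID') or col_name == 'ID':
--             return col_name
--
--     # Fallback: Ilk kolon
--     if columns and len(columns) > 0:
--         return columns[0].get('name', 'ID')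
--
--     return 'ID'
-- ===== SOURCE B (Python) =====
-- def clean_name(name):
--     """VEM_ prefix'ini kaldir"""
--     if name and name.startswith('VEM_'):
--         return name[4:]
--     return name
--
-- def get_primary_key_name(table_name, columns):
--     """Single pass: collect all priority candidates in one traversal, then decide."""
--     expected = clean_name(table_name) + "_KODU"
--     found = False
--     first_kodu = None
--     first_id = None
--     for col in columns:
--         name = col.get('name')
--         n = name if name is not None else ''
--         found = found or name == expected
--         if first_kodu is None and n.endswith('_KODU'):
--             first_kodu = n
--         if first_id is None and (n.endswith('_ID') or n == 'ID'):
--             first_id = n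
--     if found:
--         return expected
--     if first_kodu is not None:
--         return first_kodu
--     if first_id is not None:
--         return first_id
--     if columns:
--         return columns[0].get('name', 'ID')
--     return 'ID'
-- ===== Notes on version B (the rewrite author's own statement) =====
-- stated objective: simpler
-- what changed: Replaces A's four separate scans over columns (exact-match loop, first-column check, _KODU loop, _ID loop) with a single pass that records all priority candidates, followed by one priority decision.
import Mathlib
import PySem

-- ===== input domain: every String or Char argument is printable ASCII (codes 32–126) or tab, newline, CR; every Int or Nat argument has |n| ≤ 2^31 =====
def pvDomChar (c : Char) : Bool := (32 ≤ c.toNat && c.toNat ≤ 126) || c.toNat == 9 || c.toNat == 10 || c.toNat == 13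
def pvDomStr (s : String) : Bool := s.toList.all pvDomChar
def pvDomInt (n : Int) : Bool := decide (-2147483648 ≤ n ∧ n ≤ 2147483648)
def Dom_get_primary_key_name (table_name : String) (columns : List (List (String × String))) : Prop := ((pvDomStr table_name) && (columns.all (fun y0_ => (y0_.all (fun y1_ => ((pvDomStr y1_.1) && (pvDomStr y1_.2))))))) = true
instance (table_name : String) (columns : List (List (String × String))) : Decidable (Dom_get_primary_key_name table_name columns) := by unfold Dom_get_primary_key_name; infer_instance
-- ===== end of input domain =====

-- B replaces A's four separate scans over columns with one pass that records all
-- priority candidates and then decides; same O(n) cost, plainer structure.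

-- ===== PORT A =====
-- clean_name: drop a 'VEM_' prefix (shared verbatim by A and B, like the Python helper)
def pvCleanName (name : String) : String :=
  if name ≠ "" && PySem.Str.startswith name "VEM_" then PySem.Str.slice name (some 4) none
  else name

-- Oncelik 1 loop: any column whose 'name' equals expected_pk (the loop returns expected_pk itself)
def pvLoop1 (expected : String) : List (List (String × String)) → Bool
  | [] => false
  | col :: rest =>
    if (PySem.Dict.mk col).get? "name" == some expected then true else pvLoop1 expected rest

-- Oncelik 3 loop: first column whose name (default '') ends with '_KODU'
def pvLoop3 : List (List (String × String)) → Option String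
  | [] => none
  | col :: rest =>
    let n := (PySem.Dict.mk col).getD "name" ""
    if PySem.Str.endswith n "_KODU" then some n else pvLoop3 rest

-- Oncelik 4 loop: first column whose name ends with '_ID' or equals 'ID'
def pvLoop4 : List (List (String × String)) → Option String
  | [] => none
  | col :: rest =>
    let n := (PySem.Dict.mk col).getD "name" ""
    if PySem.Str.endswith n "_ID" || n == "ID" then some n else pvLoop4 rest

def get_primary_key_name (table_name : String) (columns : List (List (String × String))) : String :=
  let clean_table := pvCleanName table_name
  let expected_pk := clean_table ++ "_KODU"
  if pvLoop1 expected_pk columns then expected_pk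
  else
    match
      (match columns with
       | first :: _ =>
         let first_col := (PySem.Dict.mk first).getD "name" ""
         if PySem.Str.endswith first_col "_KODU" then some first_col else none
       | [] => none) with
    | some r => r
    | none =>
      match pvLoop3 columns with
      | some r => r
      | none =>
        match pvLoop4 columns with
        | some r => r
        | none =>
          match columns with
          | first :: _ => (PySem.Dict.mk first).getD "name" "ID"
          | [] => "ID"

-- ===== PORT B =====
-- one-pass state: (found expected?, first _KODU name, first _ID/ID name)
def pvStepB (expected : String) (st : Bool × Option String × Option String)
    (col : List (String × String)) : Bool × Option String × Option String :=
  let name? := (PySem.Dict.mk col).get? "name"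
  let n := name?.getD ""
  ( st.1 || name? == some expected,
    (if st.2.1.isNone && PySem.Str.endswith n "_KODU" then some n else st.2.1),
    (if st.2.2.isNone && (PySem.Str.endswith n "_ID" || n == "ID") then some n else st.2.2) )

def get_primary_key_name_alt (table_name : String) (columns : List (List (String × String))) : String :=
  let expected := pvCleanName table_name ++ "_KODU"
  let st := columns.foldl (pvStepB expected) (false, none, none)
  if st.1 then expected
  else
    match st.2.1 with
    | some k => k
    | none =>
      match st.2.2 with
      | some i => i
      | none =>
        match columns with
        | first :: _ => (PySem.Dict.mk first).getD "name" "ID"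
        | [] => "ID"

-- ===== PRECONDITION & SPEC =====
def Spec_get_primary_key_name (table_name : String) (columns : List (List (String × String))) (out : String) : Prop := out = get_primary_key_name_alt table_name columns
instance (table_name : String) (columns : List (List (String × String))) (out : String) : Decidable (Spec_get_primary_key_name table_name columns out) := by unfold Spec_get_primary_key_name; infer_instance

-- ===== CLAIM (what is proved, stated in full; the proofs are below) =====
def Claim_equal_get_primary_key_name : Prop := ∀ (table_name : String) (columns : List (List (String × String))), Dom_get_primary_key_name table_name columns → Spec_get_primary_key_name table_name columns (get_primary_key_name table_name columns)

-- ===== LEMMAS AND PROOFS =====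

-- B's fold computes exactly the results of A's three independent first-match scans
theorem pvFoldB_eq (expected : String) (cols : List (List (String × String)))
    (found : Bool) (fk fid : Option String) :
    cols.foldl (pvStepB expected) (found, fk, fid) =
      (found || pvLoop1 expected cols,
       (if fk.isNone then pvLoop3 cols else fk),
       (if fid.isNone then pvLoop4 cols else fid)) := by
  induction cols generalizing found fk fid with
  | nil => simp [pvLoop1, pvLoop3, pvLoop4]
  | cons col rest ih =>
    simp only [List.foldl_cons, ih, pvStepB, pvLoop1, pvLoop3, pvLoop4]
    cases fk <;> cases fid <;>
      simp [PySem.Dict.getD_eq_get?_getD, Bool.or_assoc, beq_eq_decide] <;>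
      split_ifs <;> simp_all

-- if the first column's name ends with '_KODU', pvLoop3 returns exactly that name
theorem pvLoop3_cons_pos (first : List (String × String)) (rest : List (List (String × String)))
    (h : PySem.Str.endswith ((PySem.Dict.mk first).getD "name" "") "_KODU" = true) :
    pvLoop3 (first :: rest) = some ((PySem.Dict.mk first).getD "name" "") := by
  simp only [pvLoop3]
  rw [if_pos h]

-- ===== VERDICT (by name: the statement is the Claim_ definition above) =====
theorem get_primary_key_name_spec : Claim_equal_get_primary_key_name := by
  intro table_name columns _
  unfold Spec_get_primary_key_name get_primary_key_name get_primary_key_name_alt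
  simp only [pvFoldB_eq]
  simp only [Bool.false_or, Option.isNone_none]
  cases h1 : pvLoop1 (pvCleanName table_name ++ "_KODU") columns
  · simp only [Bool.false_eq_true, if_false]
    cases columns with
    | nil => simp [pvLoop3, pvLoop4]
    | cons first rest =>
      by_cases h2 : PySem.Str.endswith ((PySem.Dict.mk first).getD "name" "") "_KODU" = true
      · rw [pvLoop3_cons_pos first rest h2]
        simp only [PySem.Str.endswith_eq, show "_KODU".toList = ['_','K','O','D','U'] from rfl] at h2
        simp [h2]
      · simp only [Bool.not_eq_true, PySem.Str.endswith_eq, show "_KODU".toList = ['_','K','O','D','U'] from rfl] at h2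
        simp [h2]
  · simp
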